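-- pv_equiv track=rewrite | github.com/sjarmak/agent-diagnostics | src/agent_diagnostics/calibrate.py | _partition_by_error
-- ===== SOURCE A (Python) =====
-- def _partition_by_error(
--     shared_all: set[str],
--     a_status: dict[str, str],
--     b_status: dict[str, str],
-- ) -> tuple[set[str], int, int]:
--     """Drop trials whose status on either side is ``"error"``.
--
--     Returns ``(shared, a_errors, b_errors)``.
--     """
--     a_errors = sum(1 for t in shared_all if a_status.get(t, "ok") == "error")
--     b_errors = sum(1 for t in shared_all if b_status.get(t, "ok") == "error")
--     shared = {
--         t
--         for t in shared_all
--         if a_status.get(t, "ok") != "error" and b_status.get(t, "ok") != "error"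
--     }
--     return shared, a_errors, b_errors
-- ===== SOURCE B (Python) =====
-- def _partition_by_error(
--     shared_all: set[str],
--     a_status: dict[str, str],
--     b_status: dict[str, str],
-- ) -> tuple[set[str], int, int]:
--     """Index the error trials from each status dict, then use set algebra.
--
--     Instead of looking each trial up in the dicts, scan each dict once to
--     build its set of error trials; the counts are intersection sizes and
--     the surviving trials are a set difference.
--     """
--     err_a = {t for t, s in a_status.items() if s == "error"}
--     err_b = {t for t, s in b_status.items() if s == "error"}
--     a_errors = len(shared_all & err_a)
--     b_errors = len(shared_all & err_b)
--     shared = shared_all - (err_a | err_b)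
--     return shared, a_errors, b_errors
-- ===== Notes on version B (the rewrite author's own statement) =====
-- stated objective: alternative
-- what changed: B inverts the traversal: instead of looking every shared trial up in the two status dicts, it scans each dict once to build its set of error trials, then gets the counts as intersection sizes and the surviving trials as a set difference.
import Mathlib
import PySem

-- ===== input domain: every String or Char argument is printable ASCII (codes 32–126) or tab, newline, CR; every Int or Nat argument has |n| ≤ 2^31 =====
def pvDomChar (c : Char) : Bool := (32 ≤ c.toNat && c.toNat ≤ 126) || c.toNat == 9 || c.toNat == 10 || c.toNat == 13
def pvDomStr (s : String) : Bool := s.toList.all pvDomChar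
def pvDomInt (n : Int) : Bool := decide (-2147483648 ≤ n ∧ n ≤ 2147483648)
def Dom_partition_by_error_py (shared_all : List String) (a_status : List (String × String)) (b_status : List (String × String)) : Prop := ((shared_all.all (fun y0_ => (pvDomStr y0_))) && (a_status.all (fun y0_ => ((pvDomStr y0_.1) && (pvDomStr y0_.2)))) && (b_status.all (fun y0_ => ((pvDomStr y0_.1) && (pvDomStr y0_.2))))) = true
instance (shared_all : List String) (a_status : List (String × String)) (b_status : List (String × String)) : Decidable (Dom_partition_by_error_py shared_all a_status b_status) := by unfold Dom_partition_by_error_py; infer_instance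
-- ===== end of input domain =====

-- B inverts the traversal: instead of looking every trial up in the dicts, it scans each dict once
-- for its error trials and answers with set algebra (objective: alternative, same asymptotic cost).

-- ===== PORT A =====
-- a_errors = sum(1 for t in shared_all if a_status.get(t, "ok") == "error")
def pvErrCount (d : List (String × String)) (l : List String) (acc : Int) : Int :=
  l.foldl (fun acc t => if PySem.Dict.getD (PySem.Dict.ofList d) t "ok" = "error" then acc + 1 else acc) acc

def partition_by_error_py (shared_all : List String) (a_status : List (String × String)) (b_status : List (String × String)) : List String × Int × Int :=
  let a_errors := pvErrCount a_status shared_all 0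
  let b_errors := pvErrCount b_status shared_all 0
  -- set comprehension over shared_all
  let shared := shared_all.foldl (fun s t =>
      if PySem.Dict.getD (PySem.Dict.ofList a_status) t "ok" ≠ "error" ∧ PySem.Dict.getD (PySem.Dict.ofList b_status) t "ok" ≠ "error"
      then PySem.Set.add s t else s) PySem.Set.empty
  (shared, a_errors, b_errors)

-- ===== PORT B =====
-- err_a = {t for t, s in a_status.items() if s == "error"}
def pvErrSet (d : List (String × String)) : PySem.Set String :=
  PySem.Set.ofList (((PySem.Dict.ofList d).items.filter (fun p => p.2 == "error")).map Prod.fst)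

def partition_by_error_py_alt (shared_all : List String) (a_status : List (String × String)) (b_status : List (String × String)) : List String × Int × Int :=
  let err_a := pvErrSet a_status
  let err_b := pvErrSet b_status
  let a_errors := PySem.Set.len (PySem.Set.inter shared_all err_a)
  let b_errors := PySem.Set.len (PySem.Set.inter shared_all err_b)
  let shared := PySem.Set.diff shared_all (PySem.Set.union err_a err_b)
  (shared, a_errors, b_errors)

-- ===== PRECONDITION & SPEC =====
-- shared_all models a Python set[str], so its list holds distinct elements; duplicate lists
-- correspond to no Python input and are excluded.
def Pre_partition_by_error_py (shared_all : List String) (_a_status : List (String × String)) (_b_status : List (String × String)) : Prop :=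
  shared_all.Nodup
instance (shared_all : List String) (a_status : List (String × String)) (b_status : List (String × String)) : Decidable (Pre_partition_by_error_py shared_all a_status b_status) := by unfold Pre_partition_by_error_py; infer_instance

def pvWitness_partition_by_error_py : List String × (List (String × String)) × (List (String × String)) :=
  (["t1", "t2", "t3"], [("t1", "error"), ("t2", "ok")], [("t2", "error")])

def Spec_partition_by_error_py (shared_all : List String) (a_status : List (String × String)) (b_status : List (String × String)) (out : List String × Int × Int) : Prop := out = partition_by_error_py_alt shared_all a_status b_status
instance (shared_all : List String) (a_status : List (String × String)) (b_status : List (String × String)) (out : List String × Int × Int) : Decidable (Spec_partition_by_error_py shared_all a_status b_status out) := by unfold Spec_partition_by_error_py; infer_instance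

-- ===== CLAIM (what is proved, stated in full; the proofs are below) =====
def Claim_equal_partition_by_error_py : Prop := ∀ (shared_all : List String) (a_status : List (String × String)) (b_status : List (String × String)), Dom_partition_by_error_py shared_all a_status b_status → Pre_partition_by_error_py shared_all a_status b_status → Spec_partition_by_error_py shared_all a_status b_status (partition_by_error_py shared_all a_status b_status)

-- ===== LEMMAS AND PROOFS =====
-- membership in B's error set is exactly A's per-trial lookup test
theorem mem_pvErrSet (d : List (String × String)) (t : String) :
    t ∈ pvErrSet d ↔ PySem.Dict.getD (PySem.Dict.ofList d) t "ok" = "error" := by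
  unfold pvErrSet
  rw [PySem.Set.mem_ofList]
  constructor
  · intro h
    rcases List.mem_map.mp h with ⟨p, hp, rfl⟩

    rcases List.mem_filter.mp hp with ⟨hmem, hval⟩
    have hv : p.2 = "error" := by simpa using hval
    obtain ⟨k, v⟩ := p
    have hgv : (PySem.Dict.ofList d).get? k = some v :=
      PySem.Dict.get?_of_mem_items _ hmem (PySem.Dict.nodup_keys_ofList d)
    rw [PySem.Dict.getD_eq_get?_getD, hgv]
    simpa using hv
  · intro h
    have hget : (PySem.Dict.ofList d).get? t = some "error" := by
      rw [PySem.Dict.getD_eq_get?_getD] at h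
      cases hg : (PySem.Dict.ofList d).get? t with
      | none => rw [hg] at h; simp [Option.getD] at h
      | some v => rw [hg] at h; simp [Option.getD] at h; rw [h]
    have : (t, "error") ∈ (PySem.Dict.ofList d).items :=
      PySem.Dict.mem_items_of_get?_eq_some _ hget
    exact List.mem_map.mpr ⟨(t, "error"), List.mem_filter.mpr ⟨this, by simp⟩, rfl⟩

-- A's counting pass equals the size of the intersection with B's error set
theorem count_eq_inter_len (d : List (String × String)) :
    ∀ (l : List String) (acc : Int),
    pvErrCount d l acc = acc + PySem.Set.len (PySem.Set.inter l (pvErrSet d)) := by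
  intro l
  induction l with
  | nil => intro acc; simp [pvErrCount, PySem.Set.inter, PySem.Set.len]
  | cons x xs ih =>
    intro acc
    simp only [pvErrCount] at ih ⊢
    rw [List.foldl_cons]
    by_cases h : PySem.Dict.getD (PySem.Dict.ofList d) x "ok" = "error"
    · rw [if_pos h, ih]
      have hm : x ∈ pvErrSet d := (mem_pvErrSet d x).mpr h
      simp [PySem.Set.inter, PySem.Set.len, hm]
      ring
    · rw [if_neg h, ih]
      have hm : x ∉ pvErrSet d := fun hx => h ((mem_pvErrSet d x).mp hx)
      simp [PySem.Set.inter, PySem.Set.len, hm]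

-- A's set-building fold on a duplicate-free list is a filter
theorem fold_add_eq_filter (p : String → Prop) [DecidablePred p] :
    ∀ (l : List String) (s : PySem.Set String), l.Nodup → (∀ t ∈ l, t ∉ s) →
    l.foldl (fun s t => if p t then PySem.Set.add s t else s) s
      = s ++ l.filter (fun t => decide (p t)) := by
  intro l
  induction l with
  | nil => intro s _ _; simp
  | cons x xs ih =>
    intro s hnd hdis
    have hx : x ∉ s := hdis x (by simp)
    have hnd' := (List.nodup_cons.mp hnd).2
    have hxxs := (List.nodup_cons.mp hnd).1
    simp only [List.foldl_cons, List.filter_cons]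
    by_cases h : p x
    · rw [if_pos h, PySem.Set.add_of_not_mem hx,
        ih (s ++ [x]) hnd' (by
          intro t ht hts
          rcases List.mem_append.mp hts with h1 | h2
          · exact hdis t (by simp [ht]) h1
          · exact hxxs ((List.mem_singleton.mp h2) ▸ ht))]
      simp [h]
    · rw [if_neg h, ih s hnd' (fun t ht => hdis t (by simp [ht]))]
      simp [h]

-- ===== VERDICT (by name: the statement is the Claim_ definition above) =====
theorem partition_by_error_py_spec : Claim_equal_partition_by_error_py := by
  intro shared_all a_status b_status _ hpre
  unfold Spec_partition_by_error_py partition_by_error_py partition_by_error_py_alt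
  refine Prod.ext ?_ (Prod.ext ?_ ?_)
  · -- shared component
    show shared_all.foldl _ PySem.Set.empty = PySem.Set.diff shared_all _
    rw [fold_add_eq_filter _ shared_all PySem.Set.empty hpre (by intro t _ h; simp [PySem.Set.empty] at h)]
    simp only [PySem.Set.empty, List.nil_append, PySem.Set.diff]
    apply List.filter_congr
    intro t _
    by_cases ha : PySem.Dict.getD (PySem.Dict.ofList a_status) t "ok" = "error" <;>
      by_cases hb : PySem.Dict.getD (PySem.Dict.ofList b_status) t "ok" = "error" <;>
      · have hma := mem_pvErrSet a_status t
        have hmb := mem_pvErrSet b_status t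
        have hu : (t ∈ PySem.Set.union (pvErrSet a_status) (pvErrSet b_status)) ↔
            (t ∈ pvErrSet a_status ∨ t ∈ pvErrSet b_status) := PySem.Set.mem_union _ _ _
        simp [ha, hb, hu, hma, hmb]
  · exact (count_eq_inter_len a_status shared_all 0).trans (by ring_nf)
  · exact (count_eq_inter_len b_status shared_all 0).trans (by ring_nf)
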